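-- pv_equiv track=rewrite | github.com/bulik0071/advent-of-code-2023 | day4/day4.py | count_points_by_set
-- ===== SOURCE A (Python) =====
-- def count_points_by_set(user_numbers:list, winning_numbers:list):
--     counter=0
--     points=0
--     for user_number in user_numbers:
--         for winning_number in winning_numbers:
--             if user_number==winning_number:
--                 counter=counter+1
--                 if counter==1:
--                     points=1
--                 elif counter==2:
--                     points=2
--                 else:
--                     points=points*2
--     return points
-- ===== SOURCE B (Python) =====
-- def count_points_by_set(user_numbers: list, winning_numbers: list):
--     counts = {}
--     for w in winning_numbers:
--         counts[w] = counts.get(w, 0) + 1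
--     k = 0
--     for u in user_numbers:
--         k += counts.get(u, 0)
--     return 0 if k == 0 else 2 ** (k - 1)
-- ===== Notes on version B (the rewrite author's own statement) =====
-- stated objective: faster
-- what changed: Replaces the nested scan plus incremental doubling with a hash-count of winning_numbers, one pass summing multiplicities k, and the closed form 0 if k==0 else 2**(k-1); intended as asymptotically faster (O(n+m) vs O(n*m)); measured 226x at n=256, while at the largest probe size both exceed the time budget on some inputs (the result itself is a huge integer).
import Mathlib
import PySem

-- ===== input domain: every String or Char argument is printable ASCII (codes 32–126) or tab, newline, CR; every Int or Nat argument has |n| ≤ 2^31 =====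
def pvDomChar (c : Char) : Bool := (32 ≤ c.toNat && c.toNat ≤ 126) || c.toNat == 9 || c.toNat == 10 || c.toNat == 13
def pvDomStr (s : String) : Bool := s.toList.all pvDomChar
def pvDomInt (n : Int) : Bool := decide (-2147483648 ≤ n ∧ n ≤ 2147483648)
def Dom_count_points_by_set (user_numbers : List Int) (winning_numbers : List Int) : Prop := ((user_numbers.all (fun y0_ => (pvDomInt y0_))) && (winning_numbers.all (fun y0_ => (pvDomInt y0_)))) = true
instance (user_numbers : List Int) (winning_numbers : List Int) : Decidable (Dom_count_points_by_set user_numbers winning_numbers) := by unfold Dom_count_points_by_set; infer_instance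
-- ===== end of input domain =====

-- B replaces A's nested scan with a hash-count of winning_numbers, a single summing pass, and the closed form 2^(k-1); intended as faster (measured 226x at n=256; at the largest probe size both time out on some inputs).


-- ===== PORT A =====
-- inner loop body of A ('for winning_number in winning_numbers: …'), state = (counter, points)
def pvStepA (user_number : Int) (st : Int × Int) (winning_number : Int) : Int × Int :=
  if user_number == winning_number then
    let counter := st.1 + 1
    let points := if counter == 1 then (1 : Int) else if counter == 2 then 2 else st.2 * 2
    (counter, points)
  else st

def count_points_by_set (user_numbers : List Int) (winning_numbers : List Int) : Int :=
  (user_numbers.foldl (fun st user_number => winning_numbers.foldl (pvStepA user_number) st) (0, 0)).2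

-- ===== PORT B =====
def count_points_by_set_alt (user_numbers : List Int) (winning_numbers : List Int) : Int :=
  let counts := winning_numbers.foldl (fun d w => d.insert w (d.getD w 0 + 1)) (PySem.Dict.empty : PySem.Dict Int Int)
  let k := user_numbers.foldl (fun s u => s + counts.getD u 0) 0
  if k == 0 then 0 else 2 ^ (k - 1).toNat

-- ===== PRECONDITION & SPEC =====
def Spec_count_points_by_set (user_numbers : List Int) (winning_numbers : List Int) (out : Int) : Prop := out = count_points_by_set_alt user_numbers winning_numbers
instance (user_numbers : List Int) (winning_numbers : List Int) (out : Int) : Decidable (Spec_count_points_by_set user_numbers winning_numbers out) := by unfold Spec_count_points_by_set; infer_instance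

-- ===== CLAIM (what is proved, stated in full; the proofs are below) =====
def Claim_equal_count_points_by_set : Prop := ∀ (user_numbers : List Int) (winning_numbers : List Int), Dom_count_points_by_set user_numbers winning_numbers → Spec_count_points_by_set user_numbers winning_numbers (count_points_by_set user_numbers winning_numbers)

-- ===== LEMMAS AND PROOFS =====

-- points as a function of the number of matches seen so far
def pvPts (c : Int) : Int := if c = 0 then 0 else 2 ^ (c - 1).toNat

theorem pvPts_step (c : Int) (hc : 0 ≤ c) :
    (if c + 1 = 1 then (1 : Int) else if c + 1 = 2 then 2 else pvPts c * 2) = pvPts (c + 1) := by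
  rcases eq_or_lt_of_le hc with h0 | h1
  · simp [pvPts, ← h0]
  · rcases eq_or_lt_of_le (by omega : (1 : Int) ≤ c) with h1' | h2
    · simp [pvPts, ← h1']
    · have hne1 : c + 1 ≠ 1 := by omega
      have hne2 : c + 1 ≠ 2 := by omega
      have hcne : c ≠ 0 := by omega
      have hc1 : c + 1 ≠ 0 := by omega
      simp only [hne1, hne2, if_false, pvPts, hcne, hc1]
      have ht : (c + 1 - 1).toNat = (c - 1).toNat + 1 := by omega
      rw [ht, pow_succ]

theorem pvInner (u : Int) (ws : List Int) : ∀ (c : Int), 0 ≤ c →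
    ws.foldl (pvStepA u) (c, pvPts c) = (c + ws.count u, pvPts (c + ws.count u)) := by
  induction ws with
  | nil => intro c hc; simp
  | cons w ws ih =>
    intro c hc
    by_cases h : u = w
    · have hstep : pvStepA u (c, pvPts c) w = (c + 1, pvPts (c + 1)) := by
        simp only [pvStepA, h, beq_self_eq_true, if_true]
        have := pvPts_step c hc
        simp only [beq_iff_eq]
        exact congrArg (Prod.mk (c + 1)) this
      have hcount : ((w :: ws).count u : Int) = (ws.count u : Int) + 1 := by
        rw [List.count_cons]
        simp [h]
      rw [List.foldl_cons, hstep, ih (c + 1) (by omega), hcount,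
          show c + 1 + (ws.count u : Int) = c + ((ws.count u : Int) + 1) by ring]
    · have hstep : pvStepA u (c, pvPts c) w = (c, pvPts c) := by
        simp [pvStepA, h]
      have hcount : ((w :: ws).count u : Int) = (ws.count u : Int) := by
        have hb : (w == u) = false := by simp [Ne.symm h]
        rw [List.count_cons, hb]; simp
      rw [List.foldl_cons, hstep, ih c hc, hcount]

theorem pvOuter (ws : List Int) : ∀ (us : List Int) (c : Int), 0 ≤ c →
    us.foldl (fun st u => ws.foldl (pvStepA u) st) (c, pvPts c)
      = (c + (us.map (fun u => (ws.count u : Int))).sum,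
         pvPts (c + (us.map (fun u => (ws.count u : Int))).sum)) := by
  intro us
  induction us with
  | nil => intro c hc; simp
  | cons u us ih =>
    intro c hc
    rw [List.foldl_cons, pvInner u ws c hc,
        ih (c + ws.count u) (by positivity)]
    simp only [List.map_cons, List.sum_cons]
    rw [show c + (ws.count u : Int) + (us.map (fun u => (ws.count u : Int))).sum
          = c + ((ws.count u : Int) + (us.map (fun u => (ws.count u : Int))).sum) by ring]

theorem pvAlt_eq (us ws : List Int) : count_points_by_set_alt us ws
    = pvPts ((us.map (fun u => (ws.count u : Int))).sum) := by
  unfold count_points_by_set_alt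
  simp only [PySem.Dict.foldl_insert_getD_add_one_eq_counter, PySem.Dict.getD_counter,
    PySem.List.foldl_add, zero_add]
  simp [pvPts]

-- ===== VERDICT (by name: the statement is the Claim_ definition above) =====
theorem count_points_by_set_spec : Claim_equal_count_points_by_set := by
  intro us ws _
  unfold Spec_count_points_by_set count_points_by_set
  rw [pvAlt_eq]
  have h := pvOuter ws us 0 le_rfl
  simp only [show pvPts 0 = 0 from rfl] at h
  rw [h]
  simp
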